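-- pv_equiv track=rewrite | github.com/akgoldberg/lottery | algorithm.py | partition_intervals
-- ===== SOURCE A (Python) =====
-- import bisect
--
-- def get_constraints(intervals):
--     n = len(intervals)
--     # tuples where LCB_i > UCB_j => i < j
--     constraints = [(i,j) for i in range(n) for j in range(n) if intervals[i][0] > intervals[j][1]]
--     return constraints
--
-- def sort_intervals(intervals, return_AB=False):
--     n = len(intervals)
--     constraints = get_constraints(intervals)
--     A = [0]*len(intervals)
--     B = [0]*len(intervals)
--     for c in constraints:
--         A[c[0]] += 1 # num intervals that i is strictly above
--         B[c[1]] += 1 # num intervals that i is strictly below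
--     # sort 1 to n by decreasing A breaking ties with increasing B
--     order = sorted(range(n), key=lambda i: (-A[i], B[i]))
--     if return_AB:
--         return [intervals[i] for i in order], order, A, B
--     return [intervals[i] for i in order], order
--
-- def partition_intervals(intervals, return_inds=False):
--     # Sort intervals by decreasing # of intervals they are strictly above, breaking ties by # of intervals they are strictly below
--     _, order, _, B = sort_intervals(intervals, return_AB=True)
--     B = [-b for b in B]
--     # Use a list to track the last B of each subset
--     subsets = []
--     # To track the actual subsets, we maintain a list of lists
--     actual_subsets = []
--     actual_subsets_ind = []
--     for j in order:
--         B_j = B[j]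
--         # Find the first index in subsets where last_u >= u
--         idx = bisect.bisect_left(subsets, B_j)
--         if idx < len(subsets):
--             # Replace the subset's last u with current u
--             subsets[idx] = B_j
--             actual_subsets[idx].append(intervals[j])
--             actual_subsets_ind[idx].append(j)
--         else:
--             # Create a new subset
--             subsets.append(B_j)
--             actual_subsets.append([intervals[j]])
--             actual_subsets_ind.append([j])
--     if return_inds:
--         # Return the indices of the intervals in the original order
--         return actual_subsets, actual_subsets_ind
--
--     # Return the actual subsets
--     return actual_subsets
-- ===== SOURCE B (Python) =====
-- import bisect
--
-- def partition_intervals(intervals, return_inds=False):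
--     # Counts via sorted endpoint arrays + binary search (O(n log n)) instead of all-pairs enumeration.
--     n = len(intervals)
--     lcbs = sorted(l for l, u in intervals)
--     ucbs = sorted(u for l, u in intervals)
--     A = [bisect.bisect_left(ucbs, l) for l, u in intervals]   # intervals i is strictly above
--     B = [n - bisect.bisect_right(lcbs, u) for l, u in intervals]  # intervals i is strictly below
--     order = sorted(range(n), key=lambda i: (-A[i], B[i]))
--     negB = [-b for b in B]
--     subsets = []
--     actual_subsets = []
--     actual_subsets_ind = []
--     for j in order:
--         bj = negB[j]
--         idx = bisect.bisect_left(subsets, bj)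
--         if idx < len(subsets):
--             subsets[idx] = bj
--             actual_subsets[idx].append(intervals[j])
--             actual_subsets_ind[idx].append(j)
--         else:
--             subsets.append(bj)
--             actual_subsets.append([intervals[j]])
--             actual_subsets_ind.append([j])
--     if return_inds:
--         return actual_subsets, actual_subsets_ind
--     return actual_subsets
-- ===== Notes on version B (the rewrite author's own statement) =====
-- stated objective: faster
-- what changed: B computes the above/below counts A[i], B[j] by sorting the two endpoint arrays once and binary-searching (bisect) per interval, instead of A's enumeration of all O(n^2) constraint pairs followed by a counting pass; the greedy chain-partition sweep is unchanged.
-- outside the precondition, e.g. on partition_intervals([(0, 1)], True): A returns [[((0, 1),)], [(0,)]], B returns [[((0, 1),)], [(0,)]]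
import Mathlib
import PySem

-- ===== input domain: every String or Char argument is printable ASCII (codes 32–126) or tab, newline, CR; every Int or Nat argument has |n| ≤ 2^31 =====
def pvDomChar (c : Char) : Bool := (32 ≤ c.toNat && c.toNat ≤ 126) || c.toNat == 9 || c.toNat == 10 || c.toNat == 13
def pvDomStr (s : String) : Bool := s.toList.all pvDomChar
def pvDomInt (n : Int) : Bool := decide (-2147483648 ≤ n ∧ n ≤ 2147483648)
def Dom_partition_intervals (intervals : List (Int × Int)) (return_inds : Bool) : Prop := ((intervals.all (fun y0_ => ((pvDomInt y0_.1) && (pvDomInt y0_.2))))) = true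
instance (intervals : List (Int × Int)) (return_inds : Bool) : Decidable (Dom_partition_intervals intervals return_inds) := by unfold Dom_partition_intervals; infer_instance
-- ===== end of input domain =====

-- B computes the above/below counts via sorted endpoint arrays + binary search instead of A's all-pairs
-- constraint enumeration (an asymptotic change in the counting pass); the equivalence is about the return
-- value with return_inds = false (with return_inds = true the Python returns a 2-tuple, not a value of the
-- declared return type list[list[tuple[int,int]]]).


-- ===== PORT A =====
-- All list indices in both programs are values of range(n) (or collected from them): nonnegative and in
-- range, so Python's xs[i] / xs[i] = v are ported with Nat indices via List.getD / List.set (exact here).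

-- constraints = [(i,j) for i in range(n) for j in range(n) if intervals[i][0] > intervals[j][1]]
def get_constraints (intervals : List (Int × Int)) : List (Nat × Nat) :=
  let n := intervals.length
  (List.range n).flatMap (fun i =>
    ((List.range n).filter
        (fun j => decide ((intervals.getD i (0,0)).1 > (intervals.getD j (0,0)).2))).map
      (fun j => (i, j)))

-- sort_intervals(intervals, return_AB=True) (the only call partition_intervals makes)
def sort_intervals (intervals : List (Int × Int)) :
    List (Int × Int) × List Nat × List Int × List Int :=
  let n := intervals.length
  let cs := get_constraints intervals
  -- for c in constraints: A[c[0]] += 1; B[c[1]] += 1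
  let AB := cs.foldl
    (fun AB c => (AB.1.set c.1 (AB.1.getD c.1 0 + 1), AB.2.set c.2 (AB.2.getD c.2 0 + 1)))
    (List.replicate n (0 : Int), List.replicate n (0 : Int))
  let order := PySem.List.sorted2 (List.range n)
    (fun i => -(AB.1.getD i 0)) (fun i => AB.2.getD i 0)
  (order.map (fun i => intervals.getD i (0,0)), order, AB.1, AB.2)

-- loop body of the greedy partition sweep (bisect.bisect_left = PySem.List.bisectLeft)
def pvStepA (intervals : List (Int × Int)) (negB : List Int)
    (st : List Int × List (List (Int × Int)) × List (List Nat)) (j : Nat) :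
    List Int × List (List (Int × Int)) × List (List Nat) :=
  let bj := negB.getD j 0
  let idx := PySem.List.bisectLeft st.1 bj
  if idx < st.1.length then
    (st.1.set idx bj,
     st.2.1.set idx (st.2.1.getD idx [] ++ [intervals.getD j (0,0)]),
     st.2.2.set idx (st.2.2.getD idx [] ++ [j]))
  else
    (st.1 ++ [bj], st.2.1 ++ [[intervals.getD j (0,0)]], st.2.2 ++ [[j]])

def partition_intervals (intervals : List (Int × Int)) (return_inds : Bool) : List (List (Int × Int)) :=
  let r := sort_intervals intervals
  let order := r.2.1
  let B := (r.2.2.2).map (fun b => -b)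
  let st := order.foldl (pvStepA intervals B) ([], [], [])
  -- with return_inds = True the Python returns the 2-tuple (actual_subsets, actual_subsets_ind),
  -- which is not of the declared return type; Pre_ excludes it, the port returns actual_subsets.
  st.2.1

-- ===== PORT B =====
def pvStepB (intervals : List (Int × Int)) (negB : List Int)
    (st : List Int × List (List (Int × Int)) × List (List Nat)) (j : Nat) :
    List Int × List (List (Int × Int)) × List (List Nat) :=
  let bj := negB.getD j 0
  let idx := PySem.List.bisectLeft st.1 bj
  if idx < st.1.length then
    (st.1.set idx bj,
     st.2.1.set idx (st.2.1.getD idx [] ++ [intervals.getD j (0,0)]),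
     st.2.2.set idx (st.2.2.getD idx [] ++ [j]))
  else
    (st.1 ++ [bj], st.2.1 ++ [[intervals.getD j (0,0)]], st.2.2 ++ [[j]])

def partition_intervals_alt (intervals : List (Int × Int)) (return_inds : Bool) : List (List (Int × Int)) :=
  let n := intervals.length
  let lcbs := PySem.List.sorted (intervals.map (fun p => p.1)) (fun x => x) false
  let ucbs := PySem.List.sorted (intervals.map (fun p => p.2)) (fun x => x) false
  let A := intervals.map (fun p => (PySem.List.bisectLeft ucbs p.1 : Int))
  let B := intervals.map (fun p => (n : Int) - (PySem.List.bisectRight lcbs p.2 : Int))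
  let order := PySem.List.sorted2 (List.range n) (fun i => -(A.getD i 0)) (fun i => B.getD i 0)
  let negB := B.map (fun b => -b)
  let st := order.foldl (pvStepB intervals negB) ([], [], [])
  -- same remark as in port A about return_inds = True (excluded by Pre_)
  st.2.1

-- ===== PRECONDITION & SPEC =====
-- With return_inds = True, A returns a 2-tuple (subsets, index lists) — not a value of the declared
-- return type list[list[tuple[int,int]]] — so Pre_ excludes return_inds = true.
def Pre_partition_intervals (intervals : List (Int × Int)) (return_inds : Bool) : Prop :=
  return_inds = false
instance (intervals : List (Int × Int)) (return_inds : Bool) : Decidable (Pre_partition_intervals intervals return_inds) := by unfold Pre_partition_intervals; infer_instance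
def pvWitness_partition_intervals : (List (Int × Int)) × Bool := ([(0, 1), (2, 3), (1, 2)], false)

def Spec_partition_intervals (intervals : List (Int × Int)) (return_inds : Bool) (out : List (List (Int × Int))) : Prop := out = partition_intervals_alt intervals return_inds
instance (intervals : List (Int × Int)) (return_inds : Bool) (out : List (List (Int × Int))) : Decidable (Spec_partition_intervals intervals return_inds out) := by unfold Spec_partition_intervals; infer_instance

-- ===== CLAIM (what is proved, stated in full; the proofs are below) =====
def Claim_equal_partition_intervals : Prop := ∀ (intervals : List (Int × Int)) (return_inds : Bool), Dom_partition_intervals intervals return_inds → Pre_partition_intervals intervals return_inds → Spec_partition_intervals intervals return_inds (partition_intervals intervals return_inds)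

-- ===== LEMMAS AND PROOFS =====

lemma bisectLeft_eq_countP (xs : List Int) (x : Int) (h : xs.Pairwise (· ≤ ·)) :
    PySem.List.bisectLeft xs x = xs.countP (fun y => decide (y < x)) := by
  obtain ⟨hle, hlt, hge⟩ := PySem.List.bisectLeft_spec xs x h
  set k := PySem.List.bisectLeft xs x with hk
  have hsplit : xs = xs.take k ++ xs.drop k := (List.take_append_drop k xs).symm
  have h1 : (xs.take k).countP (fun y => decide (y < x)) = k := by
    rw [List.countP_eq_length.mpr, List.length_take_of_le hle]
    intro a ha
    obtain ⟨j, hj, rfl⟩ := List.mem_iff_getElem.mp ha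
    have hjk : j < k := lt_of_lt_of_le hj (by simp [List.length_take])
    have hjlen : j < xs.length := lt_of_lt_of_le hjk hle
    rw [List.getElem_take]
    exact decide_eq_true (hlt j hjlen hjk)
  have h2 : (xs.drop k).countP (fun y => decide (y < x)) = 0 := by
    rw [List.countP_eq_zero]
    intro a ha
    obtain ⟨j, hj, rfl⟩ := List.mem_iff_getElem.mp ha
    rw [List.getElem_drop]
    have hjlen : k + j < xs.length := by have := List.length_drop (l := xs) (i := k); omega
    simpa using not_lt.mpr (hge (k + j) hjlen (Nat.le_add_right _ _))
  conv_rhs => rw [hsplit]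
  rw [List.countP_append, h1, h2]
  omega

lemma bisectRight_eq_countP (xs : List Int) (x : Int) (h : xs.Pairwise (· ≤ ·)) :
    PySem.List.bisectRight xs x = xs.countP (fun y => decide (y ≤ x)) := by
  obtain ⟨hle, hlt, hge⟩ := PySem.List.bisectRight_spec xs x h
  set k := PySem.List.bisectRight xs x with hk
  have hsplit : xs = xs.take k ++ xs.drop k := (List.take_append_drop k xs).symm
  have h1 : (xs.take k).countP (fun y => decide (y ≤ x)) = k := by
    rw [List.countP_eq_length.mpr, List.length_take_of_le hle]
    intro a ha
    obtain ⟨j, hj, rfl⟩ := List.mem_iff_getElem.mp ha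
    have hjk : j < k := lt_of_lt_of_le hj (by simp [List.length_take])
    have hjlen : j < xs.length := lt_of_lt_of_le hjk hle
    rw [List.getElem_take]
    exact decide_eq_true (hlt j hjlen hjk)
  have h2 : (xs.drop k).countP (fun y => decide (y ≤ x)) = 0 := by
    rw [List.countP_eq_zero]
    intro a ha
    obtain ⟨j, hj, rfl⟩ := List.mem_iff_getElem.mp ha
    rw [List.getElem_drop]
    have hjlen : k + j < xs.length := by have := List.length_drop (l := xs) (i := k); omega
    simpa using not_le.mpr (hge (k + j) hjlen (Nat.le_add_right _ _))
  conv_rhs => rw [hsplit]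
  rw [List.countP_append, h1, h2]
  omega

lemma foldl_set_incr_length {α : Type} (g : α → Nat) (l : List α) (A0 : List Int) :
    (l.foldl (fun A c => A.set (g c) (A.getD (g c) 0 + 1)) A0).length = A0.length := by
  induction l generalizing A0 with
  | nil => rfl
  | cons c t ih => rw [List.foldl_cons, ih, List.length_set]

lemma foldl_set_incr {α : Type} (g : α → Nat) (l : List α) (A0 : List Int)
    (i : Nat) (hi : i < A0.length) :
    (l.foldl (fun A c => A.set (g c) (A.getD (g c) 0 + 1)) A0).getD i 0
      = A0.getD i 0 + (l.countP (fun c => decide (g c = i)) : Int) := by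
  induction l generalizing A0 with
  | nil => simp
  | cons c t ih =>
    rw [List.foldl_cons, ih _ (by simpa using hi), List.countP_cons]
    have hset : (A0.set (g c) (A0.getD (g c) 0 + 1)).getD i 0
        = if g c = i then A0.getD i 0 + 1 else A0.getD i 0 := by
      by_cases hgc : g c = i
      · subst hgc
        rw [List.getD_eq_getElem _ _ (by simpa using hi), List.getElem_set_self (by simpa using hi)]
        simp [List.getD_eq_getElem _ _ hi]
      · rw [List.getD_eq_getElem _ _ (by simpa using hi), List.getElem_set_ne (by omega),
          List.getD_eq_getElem _ _ hi]
        simp [hgc]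
    rw [hset]
    by_cases hgc : g c = i <;> simp [hgc] <;> omega

lemma countP_fst_flatMap (F : Nat → List Nat) (n i0 : Nat) (h : i0 < n) :
    ((List.range n).flatMap (fun i => (F i).map (fun j => (i, j)))).countP
        (fun c => decide (c.1 = i0))
      = (F i0).length := by
  induction n with
  | zero => omega
  | succ n ih =>
    rw [List.range_succ, List.flatMap_append, List.countP_append]
    have hblock : ∀ i, ((F i).map (fun j => (i, j))).countP (fun c => decide (c.1 = i0))
        = if i = i0 then (F i).length else 0 := by
      intro i
      rw [List.countP_map]
      by_cases hi : i = i0 <;> simp [Function.comp, hi]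
    by_cases hlt : i0 < n
    · rw [ih hlt]
      rw [List.flatMap_cons, List.flatMap_nil, List.append_nil, hblock, if_neg (by omega : ¬ n = i0)]
      omega
    · have : i0 = n := by omega
      subst this
      have hz : ((List.range i0).flatMap (fun i => (F i).map (fun j => (i, j)))).countP
          (fun c => decide (c.1 = i0)) = 0 := by
        rw [List.countP_eq_zero]
        intro c hc
        simp only [List.mem_flatMap, List.mem_map, List.mem_range] at hc
        obtain ⟨i, hi, j, hj, rfl⟩ := hc
        simp; omega
      simp [hz, hblock]

lemma countP_snd_flatMap (F : Nat → List Nat) (n j0 : Nat) (hnd : ∀ i, (F i).Nodup) :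
    ((List.range n).flatMap (fun i => (F i).map (fun j => (i, j)))).countP
        (fun c => decide (c.2 = j0))
      = (List.range n).countP (fun i => decide (j0 ∈ F i)) := by
  induction n with
  | zero => rfl
  | succ n ih =>
    rw [List.range_succ, List.flatMap_append, List.countP_append, List.countP_append, ih]
    simp only [List.flatMap_cons, List.flatMap_nil, List.append_nil, List.countP_map]
    have : (F n).countP ((fun c => decide (c.2 = j0)) ∘ (fun j => ((n : Nat), j)))
        = if j0 ∈ F n then 1 else 0 := by
      have : (F n).countP ((fun c => decide (c.2 = j0)) ∘ (fun j => ((n : Nat), j)))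
          = (F n).count j0 := by
        rw [List.count]
        apply List.countP_congr
        intro j _
        simp [Function.comp]
      rw [this]
      by_cases hm : j0 ∈ F n
      · rw [List.count_eq_one_of_mem (hnd n) hm]; simp [hm]
      · rw [List.count_eq_zero_of_not_mem hm]; simp [hm]
    rw [this, List.countP_cons]
    simp

lemma countP_range_getD (l : List (Int × Int)) (q : (Int × Int) → Bool) :
    (List.range l.length).countP (fun j => q (l.getD j (0,0))) = l.countP q := by
  induction l with
  | nil => rfl
  | cons a t ih =>
    rw [List.length_cons, List.range_succ_eq_map, List.countP_cons, List.countP_map]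
    simp only [List.getD_cons_zero]
    have : (List.range t.length).countP ((fun j => q ((a :: t).getD j (0,0))) ∘ Nat.succ)
        = (List.range t.length).countP (fun j => q (t.getD j (0,0))) := by
      apply List.countP_congr
      intro j _
      simp [Function.comp, List.getD_cons_succ]
    rw [this, ih]
    by_cases hq : q a <;> simp [hq]

lemma counts_eq (l : List (Int × Int)) :
    (get_constraints l).foldl
        (fun AB c => (AB.1.set c.1 (AB.1.getD c.1 0 + 1), AB.2.set c.2 (AB.2.getD c.2 0 + 1)))
        (List.replicate l.length (0 : Int), List.replicate l.length (0 : Int))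
      = (l.map (fun p => (PySem.List.bisectLeft (PySem.List.sorted (l.map (fun p => p.2)) (fun x => x) false) p.1 : Int)),
         l.map (fun p => (l.length : Int) - (PySem.List.bisectRight (PySem.List.sorted (l.map (fun p => p.1)) (fun x => x) false) p.2 : Int))) := by
  have hsplit := PySem.List.foldl_prod_mk
        (fun (A : List Int) (c : Nat × Nat) => A.set c.1 (A.getD c.1 0 + 1))
        (fun (B : List Int) (c : Nat × Nat) => B.set c.2 (B.getD c.2 0 + 1))
        (get_constraints l) (List.replicate l.length (0:Int)) (List.replicate l.length (0:Int))
  simp only [] at hsplit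
  rw [hsplit]
  have hup : (PySem.List.sorted (l.map (fun p => p.2)) (fun x => x) false).Pairwise (· ≤ ·) :=
    PySem.List.sorted_pairwise _ _
  have hlp : (PySem.List.sorted (l.map (fun p => p.1)) (fun x => x) false).Pairwise (· ≤ ·) :=
    PySem.List.sorted_pairwise _ _
  have hcs : get_constraints l
      = (List.range l.length).flatMap (fun i =>
          (((List.range l.length).filter
              (fun j => decide ((l.getD i (0,0)).1 > (l.getD j (0,0)).2)))).map (fun j => (i, j))) := rfl
  simp only [Prod.mk.injEq]
  constructor
  · -- A component
    apply List.ext_getElem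
    · rw [foldl_set_incr_length, List.length_replicate, List.length_map]
    · intro i h1 h2
      have hi : i < l.length := by
        rw [foldl_set_incr_length, List.length_replicate] at h1; exact h1
      rw [← List.getD_eq_getElem _ 0 h1,
          foldl_set_incr (fun c : Nat × Nat => c.1) _ _ i (by simp [hi]),
          List.getD_replicate _ hi, hcs,
          countP_fst_flatMap _ l.length i hi,
          ← List.countP_eq_length_filter,
          List.getElem_map,
          bisectLeft_eq_countP _ _ hup,
          (PySem.List.sorted_perm (l.map (fun p => p.2)) (fun x => x) false).countP_eq,
          List.countP_map]
      have hq : (List.range l.length).countP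
            (fun j => decide ((l.getD i (0,0)).1 > (l.getD j (0,0)).2))
          = l.countP (fun p => decide (p.2 < l[i].1)) := by
        rw [countP_range_getD l (fun p => decide ((l.getD i (0,0)).1 > p.2))]
        apply List.countP_congr
        intro p _
        rw [List.getD_eq_getElem l (0,0) hi]
      rw [hq]
      have hcc : ((fun y => decide (y < l[i].1)) ∘ Prod.snd)
           = (fun p : Int × Int => decide (p.2 < l[i].1)) := rfl
      rw [hcc]
      omega
  · -- B component
    apply List.ext_getElem
    · rw [foldl_set_incr_length, List.length_replicate, List.length_map]
    · intro j h1 h2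
      have hj : j < l.length := by
        rw [foldl_set_incr_length, List.length_replicate] at h1; exact h1
      rw [← List.getD_eq_getElem _ 0 h1,
          foldl_set_incr (fun c : Nat × Nat => c.2) _ _ j (by simp [hj]),
          List.getD_replicate _ hj, hcs,
          countP_snd_flatMap _ l.length j (fun i => (List.nodup_range).filter _),
          List.getElem_map,
          bisectRight_eq_countP _ _ hlp,
          (PySem.List.sorted_perm (l.map (fun p => p.1)) (fun x => x) false).countP_eq,
          List.countP_map]
      have hq : (List.range l.length).countP
            (fun i => decide (j ∈ (List.range l.length).filter
              (fun j' => decide ((l.getD i (0,0)).1 > (l.getD j' (0,0)).2))))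
          = l.countP (fun p => decide (p.1 > (l.getD j (0,0)).2)) := by
        have h1' : ∀ i ∈ List.range l.length,
            (decide (j ∈ (List.range l.length).filter
              (fun j' => decide ((l.getD i (0,0)).1 > (l.getD j' (0,0)).2))) = true)
            ↔ (decide ((l.getD i (0,0)).1 > (l.getD j (0,0)).2) = true) := by
          intro i _
          simp [List.mem_filter, List.mem_range, hj]
        rw [List.countP_congr h1']
        exact countP_range_getD l (fun p => decide (p.1 > (l.getD j (0,0)).2))
      rw [hq]
      have hgd : (l.getD j (0,0)).2 = l[j].2 :=
        congrArg Prod.snd (List.getD_eq_getElem l (0,0) hj)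
      rw [hgd]
      have hcc : ((fun y => decide (y ≤ l[j].2)) ∘ fun p : Int × Int => p.1)
           = (fun p : Int × Int => decide (p.1 ≤ l[j].2)) := rfl
      rw [hcc]
      have hsum := List.length_eq_countP_add_countP
        (fun p : Int × Int => decide (p.1 ≤ l[j].2)) (l := l)
      have hnot : l.countP (fun p : Int × Int => decide ¬(decide (p.1 ≤ l[j].2) = true))
          = l.countP (fun p : Int × Int => decide (p.1 > l[j].2)) := by
        apply List.countP_congr; intro p _; simp
      rw [hnot] at hsum
      omega

-- ===== VERDICT (by name: the statement is the Claim_ definition above) =====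
theorem partition_intervals_spec : Claim_equal_partition_intervals := by
  intro intervals return_inds _ _
  show partition_intervals intervals return_inds = partition_intervals_alt intervals return_inds
  have hstep : pvStepA = pvStepB := rfl
  simp only [partition_intervals, partition_intervals_alt, sort_intervals, hstep]
  rw [counts_eq intervals]
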